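-- pv_equiv track=rewrite | github.com/shutech2001/bond-experiments | scripts/plot_utils.py | select_focus_methods
-- ===== SOURCE A (Python) =====
-- from typing import Any, Dict, List, Tuple
--
-- def select_focus_methods(method_order: List[str]) -> List[str]:
--     """Select the focus methods for the visualizations
--
--     Args:
--         method_order (List[str]): The order of the methods
--
--     Returns:
--         List[str]: The focus methods
--     """
--     preferred = [
--         "Current-only",
--         "Naive pooling",
--         "Fixed lambda=0.50",
--         "Power prior(lambda=0.50)",
--         "Commensurate prior(tau=1.00)",
--         "Robust MAP(epsilon=0.20)",
--         "BOND",
--     ]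
--     selected = [m for m in preferred if m in method_order]
--     for method in method_order:
--         if method not in selected and method == "BOND":
--             selected.append(method)
--     return selected
-- ===== SOURCE B (Python) =====
-- def select_focus_methods(method_order):
--     """Select the focus methods for the visualizations."""
--     preferred = [
--         "Current-only",
--         "Naive pooling",
--         "Fixed lambda=0.50",
--         "Power prior(lambda=0.50)",
--         "Commensurate prior(tau=1.00)",
--         "Robust MAP(epsilon=0.20)",
--         "BOND",
--     ]
--     rank = {m: i for i, m in enumerate(preferred)}
--     return sorted({m for m in method_order if m in rank}, key=rank.__getitem__)
-- ===== Notes on version B (the rewrite author's own statement) =====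
-- stated objective: alternative
-- what changed: B scans method_order once against a rank dict built from the preferred list, dedups with a set and sorts the few survivors by preferred position, instead of A's scan of the preferred list with a list-membership test per entry plus a dead BOND loop over method_order.
import Mathlib
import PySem

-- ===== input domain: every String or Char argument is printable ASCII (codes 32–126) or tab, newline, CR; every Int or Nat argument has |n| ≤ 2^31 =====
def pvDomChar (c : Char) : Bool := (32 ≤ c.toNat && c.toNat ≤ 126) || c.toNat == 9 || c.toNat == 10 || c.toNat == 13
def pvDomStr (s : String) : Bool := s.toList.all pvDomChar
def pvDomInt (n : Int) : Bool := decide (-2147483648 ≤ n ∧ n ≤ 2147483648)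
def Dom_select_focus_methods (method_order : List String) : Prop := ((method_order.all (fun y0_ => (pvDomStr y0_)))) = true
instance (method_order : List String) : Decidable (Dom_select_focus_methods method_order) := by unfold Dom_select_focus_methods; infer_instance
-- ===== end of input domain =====

-- B replaces A's scan over the fixed preferred list (plus a dead BOND loop) by a rank-dict
-- lookup over method_order, a set dedup and a sort by preferred position; same return value.

def pvPreferred : List String :=
  ["Current-only", "Naive pooling", "Fixed lambda=0.50", "Power prior(lambda=0.50)",
   "Commensurate prior(tau=1.00)", "Robust MAP(epsilon=0.20)", "BOND"]

-- ===== PORT A =====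
def select_focus_methods (method_order : List String) : List String :=
  let selected := pvPreferred.filter (fun m => method_order.contains m)
  method_order.foldl
    (fun sel method =>
      if !sel.contains method && method == "BOND" then sel ++ [method] else sel)
    selected

-- ===== PORT B =====
def pvRank : PySem.Dict String Int :=
  (PySem.List.enumerate pvPreferred).foldl (fun d p => d.insert p.2 p.1) (PySem.Dict.empty)

def select_focus_methods_alt (method_order : List String) : List String :=
  PySem.List.sorted
    (PySem.Set.ofList (method_order.filter (fun m => pvRank.contains m)))
    (fun m => pvRank.getD m 0) false

-- ===== PRECONDITION & SPEC =====
def Spec_select_focus_methods (method_order : List String) (out : List String) : Prop := out = select_focus_methods_alt method_order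
instance (method_order : List String) (out : List String) : Decidable (Spec_select_focus_methods method_order out) := by unfold Spec_select_focus_methods; infer_instance

-- ===== CLAIM (what is proved, stated in full; the proofs are below) =====
def Claim_equal_select_focus_methods : Prop := ∀ (method_order : List String), Dom_select_focus_methods method_order → Spec_select_focus_methods method_order (select_focus_methods method_order)

-- ===== LEMMAS AND PROOFS =====

lemma rank_keys : pvRank.keys = pvPreferred := by decide

lemma rank_contains (x : String) : pvRank.contains x = pvPreferred.contains x := by
  rw [PySem.Dict.contains_eq_decide_mem_keys, rank_keys]
  simp

-- A's second loop never fires: "BOND" ∈ preferred, so BOND already got selected.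
lemma fold_noop (mo : List String) (sel : List String)
    (h : ∀ m ∈ mo, m = "BOND" → sel.contains "BOND" = true) :
    mo.foldl (fun sel method =>
      if !sel.contains method && method == "BOND" then sel ++ [method] else sel) sel = sel := by
  induction mo with
  | nil => rfl
  | cons a t ih =>
    simp only [List.foldl_cons]
    have ha : (if !sel.contains a && a == "BOND" then sel ++ [a] else sel) = sel := by
      by_cases hb : a = "BOND"
      · subst hb
        have := h "BOND" (by simp) rfl
        simp [List.contains_iff_mem.mp this]
      · simp [hb]
    rw [ha]
    exact ih (fun m hm => h m (by simp [hm]))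

lemma preferred_nodup : pvPreferred.Nodup := by decide

lemma preferred_rank_pairwise :
    pvPreferred.Pairwise (fun a b => pvRank.getD a 0 < pvRank.getD b 0) := by decide

lemma b_eq_filter (mo : List String) :
    select_focus_methods_alt mo = pvPreferred.filter (fun m => mo.contains m) := by
  unfold select_focus_methods_alt
  apply PySem.List.sorted_eq_of_perm_of_pairwise_lt
  · apply (List.perm_ext_iff_of_nodup (preferred_nodup.filter _) (PySem.Set.nodup_ofList _)).mpr
    intro a
    simp [PySem.Set.mem_ofList, List.mem_filter, rank_contains]
    tauto
  · exact List.Pairwise.sublist List.filter_sublist preferred_rank_pairwise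

-- ===== VERDICT (by name: the statement is the Claim_ definition above) =====
theorem select_focus_methods_spec : Claim_equal_select_focus_methods := by
  intro mo _
  unfold Spec_select_focus_methods
  rw [b_eq_filter]
  unfold select_focus_methods
  apply fold_noop
  intro m hm hB
  subst hB
  have : ("BOND" : String) ∈ pvPreferred.filter (fun m => mo.contains m) := by
    simp [pvPreferred, List.mem_filter]
    simpa using hm
  simpa using this
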